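-- pv_equiv track=rewrite | github.com/rayjustinhuang/BitesofPy | sum_indices.py | sum_indices
-- ===== SOURCE A (Python) =====
-- from typing import List
-- from collections import defaultdict
--
-- def sum_indices(items: List[str]) -> int:
--     sum_elements = defaultdict(int)
--
--     uniques = set(items)
--
--     for char in uniques:
--         sum_elements[char] = [i for i in range(len(items)) if items[i] == char]
--
--     def sum_sequence(sublist: List[int]):
--         result = 0
--         for i in range(len(sublist)):
--             result += sum(sublist[:i])
--
--         return result
--
--     total = 0
--
--     for key in sum_elements:
--         total += sum_sequence(sum_elements[key])
--
--     return total
-- ===== SOURCE B (Python) =====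
-- def sum_indices(items):
--     # One pass: when a character recurs, it contributes the sum of the
--     # indices of its previous occurrences; keep that running sum per character.
--     total = 0
--     running = {}
--     for i, ch in enumerate(items):
--         s = running.get(ch, 0)
--         total += s
--         running[ch] = s + i
--     return total
-- ===== Notes on version B (the rewrite author's own statement) =====
-- stated objective: faster
-- what changed: Replaces the per-character index-list construction plus quadratic prefix-sum loop with a single pass keeping a per-character running sum of prior indices, adding it incrementally.
import Mathlib
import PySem

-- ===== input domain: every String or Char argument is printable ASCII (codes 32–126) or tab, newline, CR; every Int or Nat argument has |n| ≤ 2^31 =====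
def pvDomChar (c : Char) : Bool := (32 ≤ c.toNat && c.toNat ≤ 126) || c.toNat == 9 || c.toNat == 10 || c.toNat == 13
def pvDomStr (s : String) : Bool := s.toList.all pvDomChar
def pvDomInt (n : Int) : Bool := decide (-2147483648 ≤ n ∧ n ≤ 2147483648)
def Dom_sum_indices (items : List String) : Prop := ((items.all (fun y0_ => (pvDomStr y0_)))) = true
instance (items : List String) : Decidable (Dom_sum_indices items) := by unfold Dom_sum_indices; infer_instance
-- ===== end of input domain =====

-- B replaces A's per-character index lists plus prefix-sum loop by one pass keeping a
-- per-character running sum of prior indices (objective: faster).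


-- ===== PORT A =====
-- [i for i in range(len(items)) if items[i] == char]  (items[i] is always in range here,
-- so pyGetD with an unused default is exact)
def pvIdxList (items : List String) (char : String) : List Int :=
  (PySem.List.pyRange 0 (items.length : Int) 1).foldl
    (fun acc i => if PySem.List.pyGetD items i "" == char then acc ++ [i] else acc) []

-- sum_sequence: result += sum(sublist[:i]) for i in range(len(sublist))
def pvSumSequence (sublist : List Int) : Int :=
  (PySem.List.pyRange 0 (sublist.length : Int) 1).foldl
    (fun result i => result + (PySem.List.slice sublist none (some i)).sum) 0

-- the final loop reads sum_elements[key] for key in the dict; every key is present,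
-- so getD with an unused default is exact
def sum_indices (items : List String) : Int :=
  let uniques : PySem.Set String := PySem.Set.ofList items
  let sum_elements : PySem.Dict String (List Int) :=
    uniques.foldl (fun d char => d.insert char (pvIdxList items char)) PySem.Dict.empty
  sum_elements.keys.foldl (fun total key => total + pvSumSequence (sum_elements.getD key [])) 0

-- ===== PORT B =====
def sum_indices_alt (items : List String) : Int :=
  ((PySem.List.enumerate items 0).foldl
    (fun (st : Int × PySem.Dict String Int) p =>
      let s := st.2.getD p.2 0
      (st.1 + s, st.2.insert p.2 (s + p.1)))
    (0, PySem.Dict.empty)).1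

-- ===== PRECONDITION & SPEC =====
def Spec_sum_indices (items : List String) (out : Int) : Prop := out = sum_indices_alt items
instance (items : List String) (out : Int) : Decidable (Spec_sum_indices items out) := by unfold Spec_sum_indices; infer_instance

-- ===== CLAIM (what is proved, stated in full; the proofs are below) =====
def Claim_equal_sum_indices : Prop := ∀ (items : List String), Dom_sum_indices items → Spec_sum_indices items (sum_indices items)

-- ===== LEMMAS AND PROOFS =====

-- the indices of char in items, as a clean filter over a Nat range
def pvI (items : List String) (c : String) : List Int :=
  ((List.range items.length).filter (fun k => items.getD k "" == c)).map (fun (k : Nat) => (k : Int))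

theorem pvIdxList_eq (items : List String) (c : String) :
    pvIdxList items c = pvI items c := by
  unfold pvIdxList pvI
  rw [PySem.List.foldl_append_if_eq_filter, PySem.List.pyRange_one]
  simp only [Int.sub_zero, Int.toNat_natCast, zero_add, List.filter_map,
    Function.comp_def, PySem.List.pyGetD_natCast, List.nil_append]

theorem pvSumSequence_eq (l : List Int) :
    pvSumSequence l = ((List.range l.length).map (fun i => (l.take i).sum)).sum := by
  unfold pvSumSequence
  rw [PySem.List.pyRange_one]
  simp only [Int.sub_zero, Int.toNat_natCast, List.foldl_map, zero_add,
    PySem.List.slice_to_natCast]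
  rw [PySem.List.foldl_add]
  simp

theorem pvSumSequence_snoc (l : List Int) (a : Int) :
    pvSumSequence (l ++ [a]) = pvSumSequence l + l.sum := by
  rw [pvSumSequence_eq, pvSumSequence_eq]
  have h : ∀ i ∈ List.range l.length, ((l ++ [a]).take i).sum = (l.take i).sum := by
    intro i hi
    rw [List.take_append_of_le_length (le_of_lt (List.mem_range.mp hi))]
  simp [List.range_succ, List.map_congr_left h]

theorem pvI_snoc (l : List String) (x c : String) :
    pvI (l ++ [x]) c = pvI l c ++ (if x == c then [(l.length : Int)] else []) := by
  unfold pvI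
  have h : ∀ k ∈ List.range l.length,
      ((l ++ [x]).getD k "" == c) = (l.getD k "" == c) := by
    intro k hk
    rw [List.getD_append _ _ _ _ (List.mem_range.mp hk)]
  rw [List.length_append, List.length_singleton, List.range_succ, List.filter_append,
    List.filter_congr h]
  simp only [List.filter_cons, List.filter_nil]
  have hx : (l ++ [x]).getD l.length "" = x := by
    rw [List.getD_append_right _ _ _ _ (le_refl _)]
    simp
  rw [hx, List.map_append]
  by_cases hc : x = c <;> simp [hc]

theorem pvI_nil_of_not_mem (l : List String) (x : String) (hx : x ∉ l) :
    pvI l x = [] := by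
  unfold pvI
  rw [List.filter_eq_nil_iff.mpr, List.map_nil]
  intro k hk
  have hk' := List.mem_range.mp hk
  rw [List.getD_eq_getElem l "" hk']
  simp only [beq_iff_eq]
  intro h
  exact hx (h ▸ List.getElem_mem hk')

-- A as a sum over the distinct characters
theorem sum_indices_eq_sum (items : List String) :
    sum_indices items
      = ((PySem.Set.ofList items).map (fun c => pvSumSequence (pvI items c))).sum := by
  unfold sum_indices
  dsimp only
  have hnd : (PySem.Set.ofList items).Nodup := PySem.Set.nodup_ofList items
  have hitems :
      ((PySem.Set.ofList items).foldl
          (fun d char => d.insert char (pvIdxList items char)) PySem.Dict.empty).items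
        = (PySem.Set.ofList items).map (fun c => (c, pvIdxList items c)) := by
    have := PySem.Dict.items_foldl_insert_fresh (PySem.Set.ofList items)
      (fun c => c) (fun c => pvIdxList items c) PySem.Dict.empty
      (by intro a _; simp [PySem.Dict.contains_empty]) (by simpa using hnd)
    simpa using this
  set d := (PySem.Set.ofList items).foldl
      (fun d char => d.insert char (pvIdxList items char)) PySem.Dict.empty with hd
  have hkeys : d.keys = (PySem.Set.ofList items) := by
    simp [PySem.Dict.keys, hitems, Function.comp_def]
  have hknd : d.keys.Nodup := by rw [hkeys]; exact hnd
  rw [hkeys]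
  have hcongr : ∀ (acc : Int), ∀ k ∈ PySem.Set.ofList items,
      acc + pvSumSequence (d.getD k []) = acc + pvSumSequence (pvIdxList items k) := by
    intro acc k hk
    have hmem : (k, pvIdxList items k) ∈ d.items := by
      rw [hitems]; exact List.mem_map_of_mem hk
    rw [PySem.Dict.getD_of_mem_items d hmem hknd]
  rw [PySem.List.foldl_congr_mem _ _ _ _ hcongr, PySem.List.foldl_add]
  simp [pvIdxList_eq]

theorem sum_ite_eq_of_nodup {x : String} (f : String → Int) :
    ∀ (S : List String), S.Nodup →
      (S.map (fun c => if x = c then f c else 0)).sum = if x ∈ S then f x else 0 := by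
  intro S
  induction S with
  | nil => simp
  | cons a t ih =>
    intro hnd
    rcases List.nodup_cons.mp hnd with ⟨ha, ht⟩
    by_cases hxa : x = a
    · subst hxa
      have h0 : ∀ c ∈ t, (if x = c then f c else 0) = 0 := by
        intro c hc
        exact if_neg (by rintro rfl; exact ha hc)
      simp only [List.map_cons, List.sum_cons, List.mem_cons, true_or, if_true]
      rw [List.map_congr_left h0]
      simp
    · simp [hxa, ih ht]

theorem ofList_snoc (l : List String) (x : String) :
    PySem.Set.ofList (l ++ [x])
      = if x ∈ l then PySem.Set.ofList l else PySem.Set.ofList l ++ [x] := by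
  rw [PySem.Set.ofList_eq_foldl, List.foldl_append, ← PySem.Set.ofList_eq_foldl]
  simp only [List.foldl_cons, List.foldl_nil]
  unfold PySem.Set.add
  by_cases hx : x ∈ l <;>
    simp [hx, PySem.Set.contains_eq_listContains, PySem.Set.mem_ofList]

theorem sum_indices_snoc (l : List String) (x : String) :
    sum_indices (l ++ [x]) = sum_indices l + (pvI l x).sum := by
  rw [sum_indices_eq_sum, sum_indices_eq_sum, ofList_snoc]
  have hterm : ∀ c ∈ PySem.Set.ofList l,
      pvSumSequence (pvI (l ++ [x]) c)
        = pvSumSequence (pvI l c) + (if x = c then (pvI l c).sum else 0) := by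
    intro c _
    rw [pvI_snoc]
    by_cases hc : x = c
    · subst hc
      simp only [beq_self_eq_true, if_true]
      exact pvSumSequence_snoc _ _
    · have hb : (x == c) = false := beq_eq_false_iff_ne.mpr hc
      simp [hb, hc]
  by_cases hx : x ∈ l
  · rw [if_pos hx,
      List.map_congr_left hterm,
      PySem.List.sum_map_add_int,
      sum_ite_eq_of_nodup _ _ (PySem.Set.nodup_ofList l),
      if_pos ((PySem.Set.mem_ofList l x).mpr hx)]
  · rw [if_neg hx, List.map_append, List.sum_append]
    have hne : ∀ c ∈ PySem.Set.ofList l,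
        pvSumSequence (pvI (l ++ [x]) c) = pvSumSequence (pvI l c) := by
      intro c hc
      have hcx : (x == c) = false := beq_eq_false_iff_ne.mpr
        (fun h => hx (h ▸ (PySem.Set.mem_ofList l c).mp hc))
      rw [pvI_snoc, hcx]; simp
    rw [List.map_congr_left hne, pvI_nil_of_not_mem l x hx]
    have hsingle : (List.map (fun c => pvSumSequence (pvI (l ++ [x]) c)) [x]).sum
        = pvSumSequence (pvI (l ++ [x]) x) := by simp
    rw [hsingle, pvI_snoc, pvI_nil_of_not_mem l x hx]
    simp [pvSumSequence_eq]

-- B's loop state: (running total, per-character running sum of prior indices)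
def pvStB (items : List String) : Int × PySem.Dict String Int :=
  (PySem.List.enumerate items 0).foldl
    (fun (st : Int × PySem.Dict String Int) p =>
      let s := st.2.getD p.2 0
      (st.1 + s, st.2.insert p.2 (s + p.1)))
    (0, PySem.Dict.empty)

theorem pvStB_snoc (l : List String) (x : String) :
    pvStB (l ++ [x]) =
      ((pvStB l).1 + (pvStB l).2.getD x 0,
        (pvStB l).2.insert x ((pvStB l).2.getD x 0 + (l.length : Int))) := by
  unfold pvStB
  rw [PySem.List.enumerate_append, List.foldl_append]
  simp [PySem.List.enumerate_cons, PySem.List.enumerate_nil]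

theorem pvStB_invariant (items : List String) :
    (pvStB items).1 = sum_indices items ∧
      ∀ c, (pvStB items).2.getD c 0 = (pvI items c).sum := by
  induction items using List.reverseRecOn with
  | nil =>
    refine ⟨by decide, ?_⟩
    intro c
    simp [pvStB, pvI, PySem.List.enumerate_nil, PySem.Dict.getD_empty]
  | append_singleton l x ih =>
    obtain ⟨ih1, ih2⟩ := ih
    rw [pvStB_snoc]
    constructor
    · show (pvStB l).1 + (pvStB l).2.getD x 0 = _
      rw [ih1, ih2 x, sum_indices_snoc]
    · intro c
      show ((pvStB l).2.insert x _).getD c 0 = _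
      rw [PySem.Dict.getD_insert]
      by_cases hc : c = x
      · subst hc
        rw [if_pos rfl, ih2 c, pvI_snoc]
        simp
      · have hb : (x == c) = false := beq_eq_false_iff_ne.mpr (fun h => hc h.symm)
        rw [if_neg hc, ih2 c, pvI_snoc, hb]
        simp

-- ===== VERDICT (by name: the statement is the Claim_ definition above) =====
theorem sum_indices_spec : Claim_equal_sum_indices := by
  intro items _
  show sum_indices items = sum_indices_alt items
  have h := (pvStB_invariant items).1
  simpa [sum_indices_alt, pvStB] using h.symm
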